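-- pv_equiv track=rewrite | github.com/dudamarlena/pyc_source | pycfiles/autoversion_pbr-0.1.2-py2.7/__init__.py | find_reference
-- ===== SOURCE A (Python) =====
-- def find_reference(branch, buckets, tags_by_bucket):
--     branch_buckets = [ ver for ver, x in buckets if x == branch ]
--     if not branch_buckets:
--         raise AutoVersionError(('Unable to generate a package version: no setting for branch {}').format(branch))
--     branch_first_bucket = min(branch_buckets)
--     preceding_buckets = [ ver for ver, x in buckets if ver < branch_first_bucket
--                         ]
--     if not preceding_buckets:
--         return
--     else:
--         best_preceding_bucket = max(preceding_buckets)
--         tags = tags_by_bucket.get(best_preceding_bucket, ())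
--         if tags:
--             return min(tags)
--         return
--         return
--
-- class AutoVersionError(RuntimeError):
--     pass
-- ===== SOURCE B (Python) =====
-- def find_reference(branch, buckets, tags_by_bucket):
--     # single pass for the smallest bucket of this branch
--     bfb = None
--     for ver, x in buckets:
--         if x == branch and (bfb is None or ver < bfb):
--             bfb = ver
--     if bfb is None:
--         raise AutoVersionError(('Unable to generate a package version: no setting for branch {}').format(branch))
--     # predecessor among the distinct sorted bucket values
--     vals = sorted(set(ver for ver, _ in buckets))
--     i = vals.index(bfb)
--     if i == 0:
--         return None
--     best = vals[i - 1]
--     tags = tags_by_bucket.get(best, ())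
--     return min(tags) if tags else None
--
--
-- class AutoVersionError(RuntimeError):
--     pass
-- ===== Notes on version B (the rewrite author's own statement) =====
-- stated objective: alternative
-- what changed: B replaces A's three filter-then-min/max list scans by a single running-min pass over the buckets followed by a predecessor lookup in the sorted distinct bucket values.
import Mathlib
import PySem

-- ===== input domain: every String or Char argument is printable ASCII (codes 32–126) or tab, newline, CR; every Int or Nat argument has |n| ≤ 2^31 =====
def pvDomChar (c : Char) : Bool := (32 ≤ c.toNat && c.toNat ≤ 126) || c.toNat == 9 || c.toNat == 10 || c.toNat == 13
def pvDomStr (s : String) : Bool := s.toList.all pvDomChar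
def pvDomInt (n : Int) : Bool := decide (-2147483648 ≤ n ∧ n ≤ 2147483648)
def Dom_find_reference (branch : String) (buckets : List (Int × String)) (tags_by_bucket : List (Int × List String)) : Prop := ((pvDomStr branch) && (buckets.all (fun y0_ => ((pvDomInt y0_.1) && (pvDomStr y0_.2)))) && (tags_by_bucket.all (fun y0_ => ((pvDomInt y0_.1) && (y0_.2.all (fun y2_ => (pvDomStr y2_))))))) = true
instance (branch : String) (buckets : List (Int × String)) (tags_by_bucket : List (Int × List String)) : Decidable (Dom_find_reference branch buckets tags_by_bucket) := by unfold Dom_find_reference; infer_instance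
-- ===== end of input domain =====

-- B replaces A's repeated filter-then-min/max scans by one running-min pass plus a predecessor
-- lookup in the sorted distinct bucket values (objective: alternative decomposition).

-- ===== PORT A =====
def find_reference (branch : String) (buckets : List (Int × String)) (tags_by_bucket : List (Int × List String)) : Option String :=
  let branch_buckets := (buckets.filter (fun p => p.2 == branch)).map (·.1)
  match PySem.List.min? branch_buckets (fun v => v) with
  | none => none  -- Python raises AutoVersionError here; excluded by Pre_find_reference
  | some branch_first_bucket =>
    let preceding_buckets := (buckets.filter (fun p => decide (p.1 < branch_first_bucket))).map (·.1)
    match PySem.List.max? preceding_buckets (fun v => v) with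
    | none => none
    | some best_preceding_bucket =>
      let tags := ((PySem.Dict.mk tags_by_bucket).get? best_preceding_bucket).getD []
      match PySem.List.min? tags (fun s => s) with
      | none => none
      | some t => some t

-- ===== PORT B =====
-- the body of B's for-loop: running minimum over the branch-matching bucket values
def bfbStep (branch : String) (acc : Option Int) (p : Int × String) : Option Int :=
  if p.2 == branch then
    match acc with
    | none => some p.1
    | some m => if p.1 < m then some p.1 else acc
  else acc

def find_reference_alt (branch : String) (buckets : List (Int × String)) (tags_by_bucket : List (Int × List String)) : Option String :=
  match buckets.foldl (bfbStep branch) none with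
  | none => none  -- Python raises AutoVersionError here; excluded by Pre_find_reference
  | some bfb =>
    let vals := PySem.List.sorted (PySem.Set.ofList (buckets.map (·.1))) (fun v => v)
    match PySem.List.index? vals bfb with
    | none => none  -- unreachable: bfb is one of the bucket values
    | some i =>
      if i = 0 then none
      else
        match vals[i-1]? with
        | none => none  -- unreachable: i - 1 < vals.length
        | some best =>
          let tags := ((PySem.Dict.mk tags_by_bucket).get? best).getD []
          match PySem.List.min? tags (fun s => s) with
          | none => none
          | some t => some t

-- ===== PRECONDITION & SPEC =====
-- Pre_ excludes exactly the inputs on which no bucket is assigned to `branch`: A raises AutoVersionError there.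
def Pre_find_reference (branch : String) (buckets : List (Int × String)) (tags_by_bucket : List (Int × List String)) : Prop :=
  (buckets.any (fun p => p.2 == branch)) = true
instance (branch : String) (buckets : List (Int × String)) (tags_by_bucket : List (Int × List String)) : Decidable (Pre_find_reference branch buckets tags_by_bucket) := by unfold Pre_find_reference; infer_instance

def pvWitness_find_reference : String × (List (Int × String)) × (List (Int × List String)) :=
  ("master", [(2, "master"), (1, "dev"), (1, "master")], [(1, ["v1.0", "v1.1"])])

def Spec_find_reference (branch : String) (buckets : List (Int × String)) (tags_by_bucket : List (Int × List String)) (out : Option String) : Prop := out = find_reference_alt branch buckets tags_by_bucket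
instance (branch : String) (buckets : List (Int × String)) (tags_by_bucket : List (Int × List String)) (out : Option String) : Decidable (Spec_find_reference branch buckets tags_by_bucket out) := by unfold Spec_find_reference; infer_instance

-- ===== CLAIM (what is proved, stated in full; the proofs are below) =====
def Claim_equal_find_reference : Prop := ∀ (branch : String) (buckets : List (Int × String)) (tags_by_bucket : List (Int × List String)), Dom_find_reference branch buckets tags_by_bucket → Pre_find_reference branch buckets tags_by_bucket → Spec_find_reference branch buckets tags_by_bucket (find_reference branch buckets tags_by_bucket)

-- ===== LEMMAS AND PROOFS =====

theorem bfbStep_some (branch : String) (p : Int × String) (m : Int) (h : (p.2 == branch) = true) :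
    bfbStep branch (some m) p = some (min m p.1) := by
  simp only [bfbStep, h, if_pos]
  rw [Int.min_def]
  split_ifs <;> simp <;> omega

theorem bfbStep_match_none (branch : String) (p : Int × String) (h : (p.2 == branch) = true) :
    bfbStep branch none p = some p.1 := by
  simp [bfbStep, h]

theorem bfbStep_skip (branch : String) (p : Int × String) (acc : Option Int)
    (h : ¬ (p.2 == branch) = true) :
    bfbStep branch acc p = acc := by
  simp [bfbStep, h]

-- B's one-pass loop computes exactly A's min over the branch-matching bucket values.
theorem bfb_loop_some (branch : String) (l : List (Int × String)) (m : Int) :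
    l.foldl (bfbStep branch) (some m)
    = some (((l.filter (fun p => p.2 == branch)).map (·.1)).foldl min m) := by
  induction l generalizing m with
  | nil => simp
  | cons p t ih =>
    rw [List.foldl_cons]
    by_cases h : (p.2 == branch) = true
    · rw [bfbStep_some branch p m h, ih]
      simp [h]
    · rw [bfbStep_skip branch p _ h, ih]
      simp [h]

theorem bfb_loop_eq_min? (branch : String) (l : List (Int × String)) :
    l.foldl (bfbStep branch) none
    = PySem.List.min? ((l.filter (fun p => p.2 == branch)).map (·.1)) (fun v => v) := by
  induction l with
  | nil => simp [(PySem.List.min?_eq_none_iff ([] : List Int) (fun v => v)).mpr rfl]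
  | cons p t ih =>
    rw [List.foldl_cons]
    by_cases h : (p.2 == branch) = true
    · rw [bfbStep_match_none branch p h, bfb_loop_some]
      simp [h, PySem.List.min?_id_cons]
    · rw [bfbStep_skip branch p _ h, ih]
      simp [h]

-- value-level uniqueness of Python's max over a list of ints
theorem max_id_eq_some (l : List Int) (m : Int) (hm : m ∈ l) (hb : ∀ y ∈ l, y ≤ m) :
    PySem.List.max? l (fun v => v) = some m := by
  cases h : PySem.List.max? l (fun v => v) with
  | none =>
    rw [PySem.List.max?_eq_none_iff] at h
    subst h; simp at hm
  | some m' =>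
    have h1 := PySem.List.max?_mem h
    have h2 := PySem.List.max?_isMax h
    have := le_antisymm (hb m' h1) (h2 m hm)
    simp [this]

-- the predecessor in the sorted distinct values is A's max over the values below bfb
theorem pred_eq_max (V : List Int) (bfb : Int) (hmem : bfb ∈ V) :
    (match PySem.List.index? (PySem.List.sorted (PySem.Set.ofList V) (fun v => v)) bfb with
     | none => (none : Option Int)
     | some i => if i = 0 then none else (PySem.List.sorted (PySem.Set.ofList V) (fun v => v))[i-1]?)
    = PySem.List.max? (V.filter (fun v => decide (v < bfb))) (fun v => v) := by
  set vals := PySem.List.sorted (PySem.Set.ofList V) (fun v => v) with hvals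
  have pw : vals.Pairwise (· < ·) := PySem.List.sorted_ofList_pairwise_lt V
  have hmemv : ∀ x : Int, x ∈ vals ↔ x ∈ V := by
    intro x
    rw [hvals, PySem.List.mem_sorted, PySem.Set.mem_ofList]
  have hpw := List.pairwise_iff_getElem.mp pw
  have hbv : bfb ∈ vals := (hmemv bfb).mpr hmem
  obtain ⟨k, hidx⟩ := Option.isSome_iff_exists.mp ((PySem.List.index?_isSome_iff vals bfb).mpr hbv)
  obtain ⟨hk, hvk, -⟩ := PySem.List.getElem_of_index?_eq_some hidx
  rw [hidx]
  show (if k = 0 then none else vals[k-1]?) = _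
  by_cases hk0 : k = 0
  · subst hk0
    rw [if_pos rfl]
    symm
    rw [PySem.List.max?_eq_none_iff, List.filter_eq_nil_iff]
    intro v hv
    simp only [decide_eq_true_eq]
    obtain ⟨j, hj, hvj⟩ := List.mem_iff_getElem.mp ((hmemv v).mpr hv)
    rcases Nat.eq_zero_or_pos j with hj0 | hj0
    · subst hj0; rw [hvj] at hvk; omega
    · have := hpw 0 j hk hj hj0
      rw [hvk, hvj] at this
      omega
  · rw [if_neg hk0]
    have hk1 : k - 1 < vals.length := by omega
    rw [List.getElem?_eq_getElem hk1]
    symm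
    apply max_id_eq_some
    · rw [List.mem_filter]
      refine ⟨(hmemv _).mp (List.getElem_mem hk1), ?_⟩
      simp only [decide_eq_true_eq]
      have := hpw (k-1) k hk1 hk (by omega)
      rw [hvk] at this
      exact this
    · intro y hy
      rw [List.mem_filter] at hy
      obtain ⟨hyV, hylt⟩ := hy
      simp only [decide_eq_true_eq] at hylt
      obtain ⟨j, hj, hyj⟩ := List.mem_iff_getElem.mp ((hmemv y).mpr hyV)
      have hjk : j < k := by
        rcases Nat.lt_or_ge j k with h' | h'
        · exact h'
        · exfalso
          rcases Nat.lt_or_ge k j with hlt | hle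
          · have := hpw k j hk hj hlt
            rw [hvk, hyj] at this; omega
          · have : j = k := by omega
            subst this; rw [hyj] at hvk; omega
      rcases Nat.lt_or_ge j (k-1) with hlt | hle
      · have := hpw j (k-1) hj hk1 hlt
        rw [hyj] at this
        omega
      · have : j = k - 1 := by omega
        subst this
        rw [hyj]

-- ===== VERDICT (by name: the statement is the Claim_ definition above) =====
theorem find_reference_spec : Claim_equal_find_reference := by
  intro branch buckets tags_by_bucket _ _
  unfold Spec_find_reference
  simp only [find_reference, find_reference_alt]
  rw [bfb_loop_eq_min?]
  cases hmin : PySem.List.min? ((buckets.filter (fun p => p.2 == branch)).map (·.1)) (fun v => v) with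
  | none => rfl
  | some bfb =>
    have hbfb : bfb ∈ buckets.map (·.1) := by
      have := PySem.List.min?_mem hmin
      obtain ⟨p, hp, hpe⟩ := List.mem_map.mp this
      exact List.mem_map.mpr ⟨p, List.mem_of_mem_filter hp, hpe⟩
    have hfm : (buckets.filter (fun p => decide (p.1 < bfb))).map (·.1)
        = (buckets.map (·.1)).filter (fun v => decide (v < bfb)) := by
      rw [List.filter_map]
      rfl
    dsimp only
    rw [hfm, ← pred_eq_max (buckets.map (·.1)) bfb hbfb]
    cases hidx : PySem.List.index? (PySem.List.sorted (PySem.Set.ofList (buckets.map (·.1))) (fun v => v)) bfb with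
    | none => rfl
    | some i =>
      dsimp only
      by_cases hi : i = 0
      · simp [hi]
      · cases hget : (PySem.List.sorted (PySem.Set.ofList (buckets.map (·.1))) (fun v => v))[i-1]? with
        | none => simp [hi]
        | some best => simp [hi]
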